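-- pv_equiv track=rewrite | github.com/NLYSL/dragon-s-nest | pixel_merger.py | _infer_size
-- ===== SOURCE A (Python) =====
-- def _infer_size(pixel_data: dict) -> tuple[int, int]:
--     """根据坐标范围推断宽高。"""
--     if not pixel_data:
--         return 0, 0
--     xs = [k[0] for k in pixel_data.keys()]
--     ys = [k[1] for k in pixel_data.keys()]
--     w = max(xs) - min(xs) + 1
--     h = max(ys) - min(ys) + 1
--     return w, h
-- ===== SOURCE B (Python) =====
-- def _infer_size(pixel_data: dict) -> tuple[int, int]:
--     """Sort each coordinate axis once and read the extremes off the ends."""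
--     if not pixel_data:
--         return 0, 0
--     xs = sorted(k[0] for k in pixel_data.keys())
--     ys = sorted(k[1] for k in pixel_data.keys())
--     return xs[-1] - xs[0] + 1, ys[-1] - ys[0] + 1
-- ===== Notes on version B (the rewrite author's own statement) =====
-- stated objective: alternative
-- what changed: Replaces A's four builtin min/max scans with sort-then-endpoints: each coordinate axis is sorted once and the bounds are read from the first and last element of the sorted list; correct because the endpoints of a sorted list are exactly its min and max.
import Mathlib
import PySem

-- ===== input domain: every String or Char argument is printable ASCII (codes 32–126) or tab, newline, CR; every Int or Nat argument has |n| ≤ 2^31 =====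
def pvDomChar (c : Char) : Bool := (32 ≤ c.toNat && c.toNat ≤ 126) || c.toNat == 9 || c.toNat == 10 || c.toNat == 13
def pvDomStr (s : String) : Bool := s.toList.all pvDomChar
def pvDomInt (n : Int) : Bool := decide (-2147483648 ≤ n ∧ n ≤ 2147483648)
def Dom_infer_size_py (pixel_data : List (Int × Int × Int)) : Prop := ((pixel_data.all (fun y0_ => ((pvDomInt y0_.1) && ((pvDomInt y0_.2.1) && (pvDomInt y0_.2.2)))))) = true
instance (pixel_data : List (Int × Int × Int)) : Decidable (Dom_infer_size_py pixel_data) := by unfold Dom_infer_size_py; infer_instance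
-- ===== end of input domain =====

-- B replaces A's min/max scans by sort-then-endpoints: sort each axis once and read the
-- bounds from the ends of the sorted lists (objective: alternative; trades O(n) for O(n log n)).

-- ===== PORT A =====
-- A: guard on empty dict, build xs and ys lists from the keys, then max/min of each.
def infer_size_py (pixel_data : List (Int × Int × Int)) : Int × Int :=
  if pixel_data = [] then (0, 0)
  else
    let xs := pixel_data.map (fun k => k.1)
    let ys := pixel_data.map (fun k => k.2.1)
    -- max()/min() never raise here (the list is nonempty by the guard); getD 0 is unreachable
    let w := (PySem.List.max? xs (fun v => v)).getD 0 - (PySem.List.min? xs (fun v => v)).getD 0 + 1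
    let h := (PySem.List.max? ys (fun v => v)).getD 0 - (PySem.List.min? ys (fun v => v)).getD 0 + 1
    (w, h)

-- ===== PORT B =====
-- B: sort each coordinate axis, read the bounds from the ends (xs[0], xs[-1]).
def infer_size_py_alt (pixel_data : List (Int × Int × Int)) : Int × Int :=
  if pixel_data = [] then (0, 0)
  else
    let xs := PySem.List.sorted (pixel_data.map (fun k => k.1)) (fun v => v) false
    let ys := PySem.List.sorted (pixel_data.map (fun k => k.2.1)) (fun v => v) false
    -- xs[-1]/xs[0] never raise here (nonempty); getD 0 is unreachable
    ((PySem.List.pyGet? xs (-1)).getD 0 - (PySem.List.pyGet? xs 0).getD 0 + 1,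
     (PySem.List.pyGet? ys (-1)).getD 0 - (PySem.List.pyGet? ys 0).getD 0 + 1)

-- ===== PRECONDITION & SPEC =====
def Spec_infer_size_py (pixel_data : List (Int × Int × Int)) (out : Int × Int) : Prop := out = infer_size_py_alt pixel_data
instance (pixel_data : List (Int × Int × Int)) (out : Int × Int) : Decidable (Spec_infer_size_py pixel_data out) := by unfold Spec_infer_size_py; infer_instance

-- ===== CLAIM =====
def Claim_equal_infer_size_py : Prop := ∀ (pixel_data : List (Int × Int × Int)), Dom_infer_size_py pixel_data → Spec_infer_size_py pixel_data (infer_size_py pixel_data)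

-- ===== LEMMAS AND PROOFS =====

-- head of the identity-sorted nonempty list is the running min of the list
theorem sorted_first_eq_min (x : Int) (t : List Int) :
    (PySem.List.pyGet? (PySem.List.sorted (x :: t) (fun v => v) false) 0).getD 0
      = t.foldl min x := by
  have hmin : PySem.List.min? (x :: t) (fun v => v) = some (t.foldl min x) :=
    PySem.List.min?_id_cons x t
  have hmem : t.foldl min x ∈ x :: t := PySem.List.min?_mem hmin
  have hlow : ∀ y ∈ x :: t, t.foldl min x ≤ y := PySem.List.min?_isMin hmin
  obtain ⟨h, s, hs⟩ : ∃ h s, PySem.List.sorted (x :: t) (fun v => v) false = h :: s := by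
    rcases e : PySem.List.sorted (x :: t) (fun v => v) false with _ | ⟨h, s⟩
    · exact absurd ((PySem.List.sorted_eq_nil_iff _ _ _).mp e) (by simp)
    · exact ⟨h, s, rfl⟩
  have hhead_mem : h ∈ x :: t := by
    have : h ∈ PySem.List.sorted (x :: t) (fun v => v) false := by simp [hs]
    exact (PySem.List.mem_sorted _ _ _ _).mp this
  have hhead_le : ∀ y ∈ x :: t, h ≤ y := PySem.List.key_head_sorted_le _ _ hs
  have : h = t.foldl min x := le_antisymm (hhead_le _ hmem) (hlow _ hhead_mem)
  simp [hs, PySem.List.pyGet?, PySem.List.pyIdx?, this]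

-- last element of the identity-sorted nonempty list is the running max of the list
theorem sorted_last_eq_max (x : Int) (t : List Int) :
    (PySem.List.pyGet? (PySem.List.sorted (x :: t) (fun v => v) false) (-1)).getD 0
      = t.foldl max x := by
  have hmax : PySem.List.max? (x :: t) (fun v => v) = some (t.foldl max x) :=
    PySem.List.max?_id_cons x t
  have hmem : t.foldl max x ∈ x :: t := PySem.List.max?_mem hmax
  have hhigh : ∀ y ∈ x :: t, y ≤ t.foldl max x := PySem.List.max?_isMax hmax
  set s := PySem.List.sorted (x :: t) (fun v => v) false with hsdef
  have hne : s ≠ [] := by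
    intro e; exact absurd ((PySem.List.sorted_eq_nil_iff _ _ _).mp e) (by simp)
  have hlen : 0 < s.length := List.length_pos_iff.mpr hne
  have hlast_mem : s[s.length - 1] ∈ x :: t := by
    have : s[s.length - 1] ∈ s := List.getElem_mem (by omega)
    exact (PySem.List.mem_sorted _ _ _ _).mp this
  -- the max is in s, so it sits at some index p ≤ length-1, hence ≤ the last element
  have hM_mem_s : t.foldl max x ∈ s := (PySem.List.mem_sorted _ _ _ _).mpr hmem
  obtain ⟨p, hp, hpe⟩ := List.mem_iff_getElem.mp hM_mem_s
  have hmono : s[p] ≤ s[s.length - 1] := by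
    have := PySem.List.sorted_id_getElem_mono (xs := x :: t)
      (p := p) (q := s.length - 1) (by omega) (by rw [← hsdef]; omega)
    simpa [← hsdef] using this
  have heq : s[s.length - 1] = t.foldl max x :=
    le_antisymm (hhigh _ hlast_mem) (hpe ▸ hmono)
  have : PySem.List.pyGet? s (-1) = some s[s.length - 1] := by
    simp only [PySem.List.pyGet?, PySem.List.pyIdx?]
    rw [if_neg (by omega), if_pos (by omega)]
    simp [List.getElem?_eq_getElem (by omega : s.length - 1 < s.length)]
  simp [this, heq]

-- ===== VERDICT =====
theorem infer_size_py_spec : Claim_equal_infer_size_py := by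
  unfold Claim_equal_infer_size_py
  intro pixel_data _
  unfold Spec_infer_size_py infer_size_py infer_size_py_alt
  match pixel_data with
  | [] => rfl
  | k :: t =>
    simp only [reduceCtorEq, if_false, List.map_cons,
      PySem.List.max?_id_cons, PySem.List.min?_id_cons, Option.getD_some,
      sorted_first_eq_min, sorted_last_eq_max]
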